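-- pv_equiv track=rewrite | github.com/xssdtest/xssdtest | xt_module/xt_lcg_random.py | value_power2_upward_align
-- ===== SOURCE A (Python) =====
-- def value_power2_upward_align(value):
--     """
--     Aligns the given value upward to the nearest power of 2.
--
--     If the given value is already a power of 2, it returns the value directly.
--     If the given value is not a power of 2, it finds the smallest power of 2 greater than the value and returns it.
--
--     Parameters:
--     value (int): The integer to be aligned.
--
--     Returns:
--     int: The integer aligned to the nearest power of 2.
--     """
--     # Validate input
--     if not isinstance(value, int) or value <= 0:
--         raise ValueError("Input must be a positive integer.")
--
--     # Check if value is already a power of 2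
--     if value & (value - 1) == 0:
--         return value
--
--     # Find the smallest power of 2 greater than value
--     power = 1
--     while power < value:
--         power <<= 1
--
--     return power
-- ===== SOURCE B (Python) =====
-- def value_power2_upward_align(value):
--     """Align value upward to the nearest power of 2 (closed form, no loop)."""
--     if not isinstance(value, int) or value <= 0:
--         raise ValueError("Input must be a positive integer.")
--     return 1 << (value - 1).bit_length()
-- ===== Notes on version B (the rewrite author's own statement) =====
-- stated objective: idiomatic
-- what changed: Replaces the power-of-two test plus doubling while-loop with the single closed-form expression 1 << (value-1).bit_length().
import Mathlib
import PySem

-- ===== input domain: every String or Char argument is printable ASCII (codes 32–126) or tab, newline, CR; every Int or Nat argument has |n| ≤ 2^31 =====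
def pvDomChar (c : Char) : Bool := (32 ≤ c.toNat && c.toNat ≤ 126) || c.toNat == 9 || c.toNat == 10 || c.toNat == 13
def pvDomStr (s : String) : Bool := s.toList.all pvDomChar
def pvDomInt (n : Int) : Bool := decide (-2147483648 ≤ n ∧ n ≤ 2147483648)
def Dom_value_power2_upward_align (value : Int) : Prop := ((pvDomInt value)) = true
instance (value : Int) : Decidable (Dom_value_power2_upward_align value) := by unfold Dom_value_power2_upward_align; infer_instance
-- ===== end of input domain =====

-- B replaces A's power-of-two test + doubling while-loop by the closed form 1 << (value-1).bit_length().

-- ===== PORT A =====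
-- the `while power < value: power <<= 1` loop; the extra `1 ≤ power` guard only
-- establishes termination and is always true on the reachable states (power starts at 1)
def pvLoopA (value power : Int) : Int :=
  if _h : 1 ≤ power ∧ power < value then pvLoopA value (power * 2) else power
termination_by (value - power).toNat
decreasing_by omega

def value_power2_upward_align (value : Int) : Int :=
  if value ≤ 0 then 0  -- raise ValueError (excluded by Pre_)
  else if Int.land value (value - 1) = 0 then value  -- value & (value - 1)
  else pvLoopA value 1

-- ===== PORT B =====
def value_power2_upward_align_alt (value : Int) : Int :=
  if value ≤ 0 then 0  -- raise ValueError (excluded by Pre_)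
  else ((1 <<< Nat.size (value - 1).toNat : Nat) : Int)  -- 1 << (value-1).bit_length()

-- ===== PRECONDITION & SPEC =====
-- A raises ValueError on value ≤ 0 (and B does the same)
def Pre_value_power2_upward_align (value : Int) : Prop := 0 < value
instance (value : Int) : Decidable (Pre_value_power2_upward_align value) := by unfold Pre_value_power2_upward_align; infer_instance
def pvWitness_value_power2_upward_align : Int := (5)

def Spec_value_power2_upward_align (value : Int) (out : Int) : Prop := out = value_power2_upward_align_alt value
instance (value : Int) (out : Int) : Decidable (Spec_value_power2_upward_align value out) := by unfold Spec_value_power2_upward_align; infer_instance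

-- ===== CLAIM (what is proved, stated in full; the proofs are below) =====
def Claim_equal_value_power2_upward_align : Prop := ∀ (value : Int), Dom_value_power2_upward_align value → Pre_value_power2_upward_align value → Spec_value_power2_upward_align value (value_power2_upward_align value)

-- ===== LEMMAS AND PROOFS =====

-- casts of naturals through Int.land
lemma land_natCast (a b : ℕ) : Int.land (a : Int) (b : Int) = ((a &&& b : ℕ) : Int) := rfl

-- a positive n with n & (n-1) = 0 is the power of two 2^(size (n-1))
lemma pow_of_land_pred (n : ℕ) (h1 : 1 ≤ n) (h : n &&& (n - 1) = 0) :
    n = 2 ^ Nat.size (n - 1) := by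
  induction n using Nat.strong_induction_on with
  | _ n ih =>
    rcases Nat.lt_or_ge n 2 with h2 | h2
    · interval_cases n
      · simp
    · rcases Nat.even_or_odd n with ⟨t, ht⟩ | ⟨t, ht⟩
      · -- n = 2t even, t ≥ 1
        have htpos : 1 ≤ t := by omega
        have hb1 : n = Nat.bit false t := by
          simp only [Nat.bit_val, Bool.toNat_false]; omega
        have hb2 : n - 1 = Nat.bit true (t - 1) := by
          simp only [Nat.bit_val, Bool.toNat_true]; omega
        have hland : n &&& (n - 1) = Nat.bit false (t &&& (t - 1)) := by
          rw [hb2, hb1, Nat.land_bit]; rfl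
        rw [hland] at h
        simp only [Nat.bit_val, Bool.toNat_false, Nat.add_zero, Nat.mul_eq_zero] at h
        have htand : t &&& (t - 1) = 0 := by omega
        have hts := ih t (by omega) htpos htand
        have hsz : Nat.size (n - 1) = Nat.size (t - 1) + 1 := by
          rw [hb2, Nat.size_bit (by simp only [Nat.bit_val, Bool.toNat_true]; omega)]
        rw [hsz, Nat.pow_succ]
        omega
      · -- n odd, n ≥ 2 : contradiction
        have hb1 : n = Nat.bit true t := by
          simp only [Nat.bit_val, Bool.toNat_true]; omega
        have hb2 : n - 1 = Nat.bit false t := by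
          simp only [Nat.bit_val, Bool.toNat_false]; omega
        have hland : n &&& (n - 1) = Nat.bit false (t &&& t) := by
          rw [hb2, hb1, Nat.land_bit]; rfl
        have hts : t &&& t = t := Nat.and_self t
        rw [hland, hts] at h
        simp only [Nat.bit_val, Bool.toNat_false, Nat.add_zero, Nat.mul_eq_zero] at h
        omega

-- the doubling loop reaches exactly 2^(size (n-1))
lemma pvLoopA_pow (n : ℕ) (hn : 2 ≤ n) :
    ∀ j k, Nat.size (n - 1) - k ≤ j → 2 ^ k < n →
      pvLoopA (n : Int) ((2 ^ k : ℕ) : Int) = ((2 ^ Nat.size (n - 1) : ℕ) : Int) := by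
  intro j
  induction j with
  | zero =>
    intro k hj hk
    exfalso
    have h1 : 2 ^ k ≤ n - 1 := by omega
    have := Nat.lt_size.mpr h1
    omega
  | succ j ih =>
    intro k hj hk
    have hklt : k < Nat.size (n - 1) := Nat.lt_size.mpr (by omega)
    rw [pvLoopA]
    rw [dif_pos (by constructor <;> [exact_mod_cast Nat.one_le_two_pow; exact_mod_cast hk])]
    have hcast : ((2 ^ k : ℕ) : Int) * 2 = ((2 ^ (k + 1) : ℕ) : Int) := by push_cast; ring
    rw [hcast]
    rcases Nat.lt_or_ge (2 ^ (k + 1)) n with hlt | hge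
    · exact ih (k + 1) (by omega) hlt
    · rw [pvLoopA, dif_neg (by
        simp only [not_and, not_lt]
        intro _
        exact_mod_cast hge)]
      have hle : Nat.size (n - 1) ≤ k + 1 := Nat.size_le.mpr (by omega)
      have heq : Nat.size (n - 1) = k + 1 := by omega
      rw [heq]

-- ===== VERDICT (by name: the statement is the Claim_ definition above) =====
theorem value_power2_upward_align_spec : Claim_equal_value_power2_upward_align := by
  intro value _hdom hpre
  have hpre' : (0 : Int) < value := hpre
  unfold Spec_value_power2_upward_align value_power2_upward_align value_power2_upward_align_alt
  have hv : ¬ value ≤ 0 := by omega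
  rw [if_neg hv, if_neg hv]
  obtain ⟨n, rfl⟩ : ∃ n : ℕ, value = (n : Int) := ⟨value.toNat, by omega⟩
  have hn1 : 1 ≤ n := by exact_mod_cast hpre'
  have hsub : (n : Int) - 1 = ((n - 1 : ℕ) : Int) := by omega
  rw [hsub]
  have htoNat : ((n - 1 : ℕ) : Int).toNat = n - 1 := Int.toNat_natCast _
  rw [htoNat, Nat.shiftLeft_eq, Nat.one_mul]
  by_cases hp : Int.land (n : Int) ((n - 1 : ℕ) : Int) = 0
  · rw [if_pos hp]
    rw [land_natCast] at hp
    have := pow_of_land_pred n hn1 (by exact_mod_cast hp)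
    exact_mod_cast this
  · rw [if_neg hp]
    have hn2 : 2 ≤ n := by
      rcases Nat.lt_or_ge n 2 with h | h
      · exfalso
        apply hp
        have hone : n = 1 := by omega
        subst hone
        rfl
      · exact h
    have := pvLoopA_pow n hn2 (Nat.size (n - 1)) 0 (by omega) (by simpa using hn2)
    simpa using this
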